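-- pv_equiv track=rewrite | github.com/quinfpunk/End-to-end_graph_missing_modalities | src/eICU_similarity.py | process_codes
-- ===== SOURCE A (Python) =====
-- def process_codes(codes, times):
--     data = []
--     t = times[0]
--     temp = (t, [])
--     for i in range(len(times)):
--         if t == times[i]:
--             temp[1].append(codes[i])
--         else:
--             data.append(temp)
--             t = times[i]
--             temp = (t, [])
--             temp[1].append(codes[i])
--     data.append(temp)
--     return data
-- ===== SOURCE B (Python) =====
-- # B: zip codes with times once, then peel off one run of equal times per
-- # outer-loop step (run length found by an inner scan), instead of A's single
-- # indexed loop that threads a current-group accumulator.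
-- def process_codes(codes, times):
--     pairs = list(zip(codes, times))
--     n = len(pairs)
--     data = []
--     i = 0
--     while i < n:
--         t = pairs[i][1]
--         j = i
--         while j < n and pairs[j][1] == t:
--             j += 1
--         data.append((t, [c for c, _ in pairs[i:j]]))
--         i = j
--     return data
-- ===== Notes on version B (the rewrite author's own statement) =====
-- stated objective: alternative
-- what changed: A threads a current-group accumulator through one indexed pass; B zips codes with times once and repeatedly peels off a whole run of equal times (inner scan for the run length), appending one finished group per outer step.
import Mathlib
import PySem

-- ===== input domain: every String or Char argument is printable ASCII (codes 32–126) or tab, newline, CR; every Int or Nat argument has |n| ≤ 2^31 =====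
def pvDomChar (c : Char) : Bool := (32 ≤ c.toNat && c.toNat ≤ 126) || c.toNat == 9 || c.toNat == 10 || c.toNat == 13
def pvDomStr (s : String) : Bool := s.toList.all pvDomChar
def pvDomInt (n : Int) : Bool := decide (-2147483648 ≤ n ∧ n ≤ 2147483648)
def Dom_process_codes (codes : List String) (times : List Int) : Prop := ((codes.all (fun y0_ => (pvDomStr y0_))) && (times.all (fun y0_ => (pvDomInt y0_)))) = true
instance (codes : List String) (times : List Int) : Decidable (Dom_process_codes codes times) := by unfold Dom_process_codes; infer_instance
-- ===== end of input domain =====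

-- B zips codes with times once and peels off one run of equal times per step; A threads a
-- current-group accumulator through one indexed pass (objective: alternative decomposition).

-- ===== PORT A =====
-- loop body; state: (data, t, temp's list) — temp = (t, list) is carried as t and the list
def stepA (s : List (Int × List String) × Int × List String) (ti : Int) (ci : String) :
    List (Int × List String) × Int × List String :=
  if s.2.1 = ti then (s.1, s.2.1, s.2.2 ++ [ci])
  else (s.1 ++ [(s.2.1, s.2.2)], ti, [ci])

def process_codes (codes : List String) (times : List Int) : List (Int × List String) :=
  let t0 := PySem.List.pyGetD times 0 0      -- times[0]; Pre_ guarantees times ≠ []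
  let st := (PySem.List.pyRange 0 (PySem.List.len times) 1).foldl
      (fun s i => stepA s (PySem.List.pyGetD times i 0) (PySem.List.pyGetD codes i ""))
      ([], t0, [])
  st.1 ++ [(st.2.1, st.2.2)]

-- ===== PORT B =====
-- inner while loop of Source B: k = number of leading pairs whose time equals t
def runLen (t : Int) : List (String × Int) → Nat
  | [] => 0
  | p :: ps => if p.2 = t then runLen t ps + 1 else 0

-- outer while loop of Source B; fuel is only a totality guard (fuel = pairs.length suffices,
-- since each step removes k ≥ 1 pairs)
def goB (fuel : Nat) (acc : List (Int × List String)) (pairs : List (String × Int)) :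
    List (Int × List String) :=
  match fuel, pairs with
  | _, [] => acc
  | 0, _ => acc
  | fuel + 1, p :: rest =>
      let k := runLen p.2 (p :: rest)
      goB fuel (acc ++ [(p.2, ((p :: rest).take k).map Prod.fst)]) ((p :: rest).drop k)

def process_codes_alt (codes : List String) (times : List Int) : List (Int × List String) :=
  goB (codes.zip times).length [] (codes.zip times)

-- ===== PRECONDITION & SPEC =====
-- Pre_ excludes exactly the inputs where A raises IndexError: empty times (times[0])
-- and codes shorter than times (codes[i]).
def Pre_process_codes (codes : List String) (times : List Int) : Prop :=
  times ≠ [] ∧ times.length ≤ codes.length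
instance (codes : List String) (times : List Int) : Decidable (Pre_process_codes codes times) := by unfold Pre_process_codes; infer_instance
def pvWitness_process_codes : List String × List Int := (["a", "b", "c"], [1, 1, 2])

def Spec_process_codes (codes : List String) (times : List Int) (out : List (Int × List String)) : Prop := out = process_codes_alt codes times
instance (codes : List String) (times : List Int) (out : List (Int × List String)) : Decidable (Spec_process_codes codes times out) := by unfold Spec_process_codes; infer_instance

-- ===== CLAIM (what is proved, stated in full; the proofs are below) =====
def Claim_equal_process_codes : Prop := ∀ (codes : List String) (times : List Int), Dom_process_codes codes times → Pre_process_codes codes times → Spec_process_codes codes times (process_codes codes times)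

-- ===== LEMMAS AND PROOFS =====

-- A's result after folding the remaining pairs from state (data, t, temp),
-- characterised recursively
def finish (t : Int) (temp : List String) : List (String × Int) → List (Int × List String)
  | [] => [(t, temp)]
  | (c, u) :: ps => if t = u then finish t (temp ++ [c]) ps else (t, temp) :: finish u [c] ps

theorem A_char (ps : List (String × Int)) :
    ∀ (data : List (Int × List String)) (t : Int) (temp : List String),
    (let st := ps.foldl (fun s p => stepA s p.2 p.1) (data, t, temp)
     st.1 ++ [(st.2.1, st.2.2)]) = data ++ finish t temp ps := by
  induction ps with
  | nil => intro data t temp; simp [finish]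
  | cons p ps ih =>
      intro data t temp
      obtain ⟨c, u⟩ := p
      by_cases h : t = u
      · have := ih data t (temp ++ [c])
        simp only [List.foldl_cons, stepA, finish, if_pos h] at *
        subst h
        simpa using this
      · have := ih (data ++ [(t, temp)]) u [c]
        simp only [List.foldl_cons, stepA, finish, if_neg h] at *
        simpa using this

theorem goB_acc : ∀ (f : Nat) (ps : List (String × Int)) (acc : List (Int × List String)),
    goB f acc ps = acc ++ goB f [] ps := by
  intro f
  induction f with
  | zero => intro ps acc; cases ps <;> simp [goB]
  | succ f ih =>
      intro ps acc
      cases ps with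
      | nil => simp [goB]
      | cons p rest =>
          rw [goB, goB]
          rw [ih _ (acc ++ _), ih _ (([] : List (Int × List String)) ++ _)]
          simp

theorem goB_congr_fuel : ∀ (f1 : Nat), ∀ (ps : List (String × Int)) (f2 : Nat)
    (acc : List (Int × List String)), ps.length ≤ f1 → ps.length ≤ f2 →
    goB f1 acc ps = goB f2 acc ps := by
  intro f1
  induction f1 with
  | zero =>
      intro ps f2 acc h1 _
      have : ps = [] := by cases ps <;> simp_all
      subst this; cases f2 <;> simp [goB]
  | succ f ih =>
      intro ps f2 acc h1 h2
      cases ps with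
      | nil => cases f2 <;> simp [goB]
      | cons p rest =>
          cases f2 with
          | zero => simp at h2
          | succ g =>
              rw [goB, goB]
              have hk : runLen p.2 (p :: rest) = runLen p.2 rest + 1 := by simp [runLen]
              apply ih
              · simp [hk] at *; omega
              · simp [hk] at *; omega

theorem finish_eq : ∀ (f : Nat) (ps : List (String × Int)) (t : Int) (temp : List String),
    ps.length ≤ f →
    finish t temp ps =
      (t, temp ++ (ps.take (runLen t ps)).map Prod.fst) :: goB f [] (ps.drop (runLen t ps)) := by
  intro f
  induction f with
  | zero =>
      intro ps t temp h
      have : ps = [] := by cases ps <;> simp_all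
      subst this; simp [finish, runLen, goB]
  | succ f ih =>
      intro ps t temp h
      cases ps with
      | nil => simp [finish, runLen, goB]
      | cons p rest =>
          obtain ⟨c, u⟩ := p
          have hle : rest.length ≤ f := by simp at h; omega
          by_cases hut : t = u
          · subst hut
            have hr : runLen t ((c, t) :: rest) = runLen t rest + 1 := by simp [runLen]
            rw [finish, if_pos rfl, hr]
            rw [ih rest t (temp ++ [c]) hle]
            rw [goB_congr_fuel f (rest.drop (runLen t rest)) (f + 1) []
              (by simp; omega) (by simp; omega)]
            simp
          · have hr : runLen t ((c, u) :: rest) = 0 := by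
              simp [runLen]; intro hc; exact absurd hc.symm hut
            rw [finish, if_neg hut, hr]
            simp only [List.take_zero, List.map_nil, List.append_nil, List.drop_zero]
            congr 1
            rw [ih rest u [c] hle]
            rw [goB]
            have hk : runLen (c, u).2 ((c, u) :: rest) = runLen u rest + 1 := by simp [runLen]
            simp only [hk, List.take_succ_cons, List.drop_succ_cons, List.map_cons]
            conv_rhs => rw [goB_acc]
            simp

theorem process_codes_spec : Claim_equal_process_codes := by
  intro codes times _ hpre
  obtain ⟨hne, hlen⟩ := hpre
  unfold Spec_process_codes process_codes process_codes_alt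
  set Z := codes.zip times with hZ
  have hZlen : Z.length = times.length := by
    simp [hZ, List.length_zip]; omega
  -- the index loop over both lists is the loop over their zip
  have hfold : ∀ init,
      (PySem.List.pyRange 0 (PySem.List.len times) 1).foldl
        (fun s i => stepA s (PySem.List.pyGetD times i 0) (PySem.List.pyGetD codes i "")) init
      = Z.foldl (fun s p => stepA s p.2 p.1) init := by
    intro init
    have hlenZ : PySem.List.len times = (Z.length : Int) := by
      simp [PySem.List.len_eq, hZlen]
    rw [hlenZ]
    rw [PySem.List.foldl_congr_mem _ _
      (fun s i => stepA s (PySem.List.pyGetD Z i ("", 0)).2 (PySem.List.pyGetD Z i ("", 0)).1) init ?_]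
    · exact PySem.List.foldl_pyRange_zero_pyGetD' Z ("", 0) (fun s p => stepA s p.2 p.1) init
    · intro s i hi
      rw [PySem.List.mem_pyRange_one] at hi
      obtain ⟨h0, hiZ⟩ := hi
      show stepA s (PySem.List.pyGetD times i 0) (PySem.List.pyGetD codes i "")
        = stepA s (PySem.List.pyGetD Z i ("", 0)).2 (PySem.List.pyGetD Z i ("", 0)).1
      rw [PySem.List.pyGetD_eq_getElem Z ("", 0) h0 (by omega),
          PySem.List.pyGetD_eq_getElem times 0 h0 (by omega),
          PySem.List.pyGetD_eq_getElem codes "" h0 (by omega)]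
      simp [hZ, List.getElem_zip]
  obtain ⟨t0, ts, rfl⟩ : ∃ t0 ts, times = t0 :: ts := by
    cases times with
    | nil => exact absurd rfl hne
    | cons a l => exact ⟨a, l, rfl⟩
  obtain ⟨c0, cs, rfl⟩ : ∃ c0 cs, codes = c0 :: cs := by
    cases codes with
    | nil => simp at hlen
    | cons a l => exact ⟨a, l, rfl⟩
  have ht0 : PySem.List.pyGetD ((t0 :: ts) : List Int) 0 0 = t0 := by simp [pysem]
  simp only [ht0, hfold]
  have hZc : Z = (c0, t0) :: cs.zip ts := by simp [hZ]
  have hdroplen : ((cs.zip ts).drop (runLen t0 (cs.zip ts))).length ≤ (cs.zip ts).length := by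
    simp
  have hkZ : runLen t0 ((c0, t0) :: cs.zip ts) = runLen t0 (cs.zip ts) + 1 := by simp [runLen]
  rw [A_char Z [] t0 [], finish_eq Z.length Z t0 [] (le_refl _), hZc, List.length_cons, hkZ]
  simp only [List.take_succ_cons, List.drop_succ_cons, List.map_cons, List.nil_append]
  rw [goB_congr_fuel ((cs.zip ts).length + 1) ((cs.zip ts).drop (runLen t0 (cs.zip ts)))
    ((cs.zip ts).length) [] (by omega) hdroplen]
  rw [goB]
  have hk2 : runLen ((c0, t0) : String × Int).2 ((c0, t0) :: cs.zip ts)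
      = runLen t0 (cs.zip ts) + 1 := by simp [runLen]
  simp only [hk2, List.take_succ_cons, List.drop_succ_cons, List.map_cons]
  conv_rhs => rw [goB_acc]
  simp
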